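-- pv_equiv track=rewrite | github.com/rycolab/swor | string_kernel_utils.py | get_all_subsequences_of_length_n_from_string
-- ===== SOURCE A (Python) =====
-- import itertools
--
-- def get_all_subsequences_of_length_n_from_string(string, n):
--     # first, split string into characters
--     string = list(string)
--     # get all combinations of indices of length n
--     combinations = list(itertools.combinations(range(len(string)), n))
--     # build the n-grams and add them to the ngram_set
--     # also, keep a ngram_dict that maps n-gram to a list of tuples of indices where it occurs
--     ngram_set = set()
--     ngram_dict = {}
--     for combi in combinations:
--         ngram = ""
--         for i in range(n):
--             ngram = ngram + string[combi[i]]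
--         ngram_set.add(ngram)
--         if ngram in ngram_dict:
--             # add indices of this ngram to the list of indices of this ngram
--             # i+1 for 1-indexing (to be consistent with the Lodhi et al. paper)
--             ngram_dict[ngram].append([i+1 for i in list(combi)])
--         else:
--             # create list of indices for this ngram and add the current indices
--             # i+1 for 1-indexing (to be consistent with the Lodhi et al. paper)
--             ngram_dict[ngram] = [[i+1 for i in list(combi)]]
--     return ngram_set, ngram_dict
-- ===== SOURCE B (Python) =====
-- def get_all_subsequences_of_length_n_from_string(string, n):
--     # DFS over (1-based index, char) pairs: at each position either take the
--     # character (extending the n-gram) or skip it; take-first gives the same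
--     # lexicographic order as itertools.combinations.
--     pairs = list(enumerate(string, 1))
--     ngram_set = set()
--     ngram_dict = {}
--
--     def dfs(pos, need, ngram, chosen):
--         if need == 0:
--             ngram_set.add(ngram)
--             if ngram in ngram_dict:
--                 ngram_dict[ngram].append(chosen)
--             else:
--                 ngram_dict[ngram] = [chosen]
--         elif pos < len(pairs):
--             idx, ch = pairs[pos]
--             dfs(pos + 1, need - 1, ngram + ch, chosen + [idx])
--             dfs(pos + 1, need, ngram, chosen)
--
--     dfs(0, n, "", [])
--     return ngram_set, ngram_dict
-- ===== Notes on version B (the rewrite author's own statement) =====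
-- stated objective: alternative
-- what changed: B replaces the materialised itertools.combinations list and the per-combination index loop with a recursive take/skip DFS over (1-based index, char) pairs that builds each n-gram string and index list incrementally on the way down; take-first recursion yields the same lexicographic order.
-- crash fix: On n < 0 A raises ValueError ('r must be non-negative', from itertools.combinations) while B's DFS naturally finds nothing and returns (set(), {}). — e.g. on get_all_subsequences_of_length_n_from_string("ab", -1): A raises ValueError, B returns ([], [])
import Mathlib
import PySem

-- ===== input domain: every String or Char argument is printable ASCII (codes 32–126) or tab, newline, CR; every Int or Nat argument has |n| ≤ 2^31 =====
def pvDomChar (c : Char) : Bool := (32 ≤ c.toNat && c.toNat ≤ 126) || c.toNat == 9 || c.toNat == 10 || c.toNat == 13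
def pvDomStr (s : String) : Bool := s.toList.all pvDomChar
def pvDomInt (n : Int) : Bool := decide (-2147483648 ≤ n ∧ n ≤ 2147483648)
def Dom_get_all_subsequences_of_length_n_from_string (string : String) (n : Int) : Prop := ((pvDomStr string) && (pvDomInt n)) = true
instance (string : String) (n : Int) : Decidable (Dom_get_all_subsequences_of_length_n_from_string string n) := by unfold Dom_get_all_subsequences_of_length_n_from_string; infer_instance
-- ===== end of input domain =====

-- B replaces the itertools.combinations materialisation + index loop with a take/skip DFS
-- over (1-based index, char) pairs that builds each n-gram and index list on the way down
-- (objective: alternative decomposition, same asymptotic cost).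

-- ===== PORT A =====
def get_all_subsequences_of_length_n_from_string (string : String) (n : Int) : List String × (List (String × List (List Int))) :=
  let chars := string.toList
  if n < 0 then ([], [])   -- itertools.combinations raises ValueError here; excluded by Pre_
  else
    let combis := PySem.List.combinations (PySem.List.pyRange 0 chars.length 1) n.toNat
    let res := combis.foldl
      (fun (st : PySem.Set String × PySem.Dict String (List (List Int))) combi =>
        let ngram := (PySem.List.pyRange 0 n 1).foldl
          (fun g i => g.push (PySem.List.pyGetD chars (PySem.List.pyGetD combi i 0) ' ')) ""
        let s := PySem.Set.add st.1 ngram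
        let d := if st.2.contains ngram then st.2.modify ngram [] (fun l => l ++ [combi.map (· + 1)])
                 else st.2.insert ngram [combi.map (· + 1)]
        (s, d))
      (PySem.Set.empty, PySem.Dict.empty)
    (res.1, res.2.items)

-- ===== PORT B =====
def pvDfs (pairs : List (Int × Char)) (need : Int) (ngram : String) (chosen : List Int)
    (st : PySem.Set String × PySem.Dict String (List (List Int))) :
    PySem.Set String × PySem.Dict String (List (List Int)) :=
  if need = 0 then
    (PySem.Set.add st.1 ngram,
     if st.2.contains ngram then st.2.modify ngram [] (fun l => l ++ [chosen])
     else st.2.insert ngram [chosen])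
  else
    match pairs with
    | [] => st
    | (idx, ch) :: rest =>
        pvDfs rest need ngram chosen (pvDfs rest (need - 1) (ngram.push ch) (chosen ++ [idx]) st)

def get_all_subsequences_of_length_n_from_string_alt (string : String) (n : Int) : List String × (List (String × List (List Int))) :=
  let pairs := PySem.List.enumerate string.toList 1
  let res := pvDfs pairs n "" [] (PySem.Set.empty, PySem.Dict.empty)
  (res.1, res.2.items)

-- ===== PRECONDITION & SPEC =====
-- Pre_ excludes n < 0, where Python A raises ValueError (from itertools.combinations).
def Pre_get_all_subsequences_of_length_n_from_string (string : String) (n : Int) : Prop := 0 ≤ n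
instance (string : String) (n : Int) : Decidable (Pre_get_all_subsequences_of_length_n_from_string string n) := by unfold Pre_get_all_subsequences_of_length_n_from_string; infer_instance
def pvWitness_get_all_subsequences_of_length_n_from_string : String × Int := ("ab", 1)

-- On n < 0 A raises ValueError ("r must be non-negative") while B naturally returns the empty set and dict.
def Raises_get_all_subsequences_of_length_n_from_string (string : String) (n : Int) : Prop := n < 0
instance (string : String) (n : Int) : Decidable (Raises_get_all_subsequences_of_length_n_from_string string n) := by unfold Raises_get_all_subsequences_of_length_n_from_string; infer_instance
def pvRaiseWitness_get_all_subsequences_of_length_n_from_string : String × Int := ("ab", -1)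
def pvRaiseWitnessOut_get_all_subsequences_of_length_n_from_string : List String × (List (String × List (List Int))) := ([], [])

def Spec_get_all_subsequences_of_length_n_from_string (string : String) (n : Int) (out : List String × (List (String × List (List Int)))) : Prop := out = get_all_subsequences_of_length_n_from_string_alt string n
instance (string : String) (n : Int) (out : List String × (List (String × List (List Int)))) : Decidable (Spec_get_all_subsequences_of_length_n_from_string string n out) := by unfold Spec_get_all_subsequences_of_length_n_from_string; infer_instance

-- ===== CLAIM (what is proved, stated in full; the proofs are below) =====
def Claim_equal_get_all_subsequences_of_length_n_from_string : Prop := ∀ (string : String) (n : Int), Dom_get_all_subsequences_of_length_n_from_string string n → Pre_get_all_subsequences_of_length_n_from_string string n → Spec_get_all_subsequences_of_length_n_from_string string n (get_all_subsequences_of_length_n_from_string string n)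
def Claim_raises_get_all_subsequences_of_length_n_from_string : Prop := (∀ (string : String) (n : Int), Dom_get_all_subsequences_of_length_n_from_string string n → Raises_get_all_subsequences_of_length_n_from_string string n → ¬ Pre_get_all_subsequences_of_length_n_from_string string n) ∧ (Dom_get_all_subsequences_of_length_n_from_string (pvRaiseWitness_get_all_subsequences_of_length_n_from_string.1) (pvRaiseWitness_get_all_subsequences_of_length_n_from_string.2) ∧ Raises_get_all_subsequences_of_length_n_from_string (pvRaiseWitness_get_all_subsequences_of_length_n_from_string.1) (pvRaiseWitness_get_all_subsequences_of_length_n_from_string.2) ∧ get_all_subsequences_of_length_n_from_string_alt (pvRaiseWitness_get_all_subsequences_of_length_n_from_string.1) (pvRaiseWitness_get_all_subsequences_of_length_n_from_string.2) = pvRaiseWitnessOut_get_all_subsequences_of_length_n_from_string)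


-- ===== LEMMAS AND PROOFS =====

-- proof-side helpers: the recording step and the fold form of the DFS
def pvRecord (ngram : String) (chosen : List Int)
    (st : PySem.Set String × PySem.Dict String (List (List Int))) :
    PySem.Set String × PySem.Dict String (List (List Int)) :=
  (PySem.Set.add st.1 ngram,
   if st.2.contains ngram then st.2.modify ngram [] (fun l => l ++ [chosen])
   else st.2.insert ngram [chosen])

def pvStep (g : String) (chosen : List Int)
    (st : PySem.Set String × PySem.Dict String (List (List Int))) (pick : List (Int × Char)) :
    PySem.Set String × PySem.Dict String (List (List Int)) :=
  pvRecord (pick.foldl (fun g p => g.push p.2) g) (chosen ++ pick.map (·.1)) st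

theorem pv_enum_shift (xs : List Char) (s : Int) :
    PySem.List.enumerate xs (s + 1) = (PySem.List.enumerate xs s).map (fun p => (p.1 + 1, p.2)) := by
  induction xs generalizing s with
  | nil => simp [PySem.List.enumerate_nil]
  | cons x xs ih => simp [PySem.List.enumerate_cons, ih (s + 1)]

theorem pv_step_cons (g : String) (chosen : List Int) (idx : Int) (ch : Char)
    (st : PySem.Set String × PySem.Dict String (List (List Int))) (pick : List (Int × Char)) :
    pvStep g chosen st ((idx, ch) :: pick) = pvStep (g.push ch) (chosen ++ [idx]) st pick := by
  simp only [pvStep, List.foldl_cons, List.map_cons, List.append_assoc, List.singleton_append]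

theorem pv_dfs_eq (pairs : List (Int × Char)) : ∀ (need : Int), 0 ≤ need →
    ∀ (g : String) (chosen : List Int) (st : PySem.Set String × PySem.Dict String (List (List Int))),
    pvDfs pairs need g chosen st =
      (PySem.List.combinations pairs need.toNat).foldl (pvStep g chosen) st := by
  induction pairs with
  | nil =>
    intro need hn g chosen st
    by_cases h0 : need = 0
    · subst h0
      simp [pvDfs, PySem.List.combinations_zero, pvStep, pvRecord]
    · obtain ⟨k, hk⟩ : ∃ k : Nat, need.toNat = k + 1 := ⟨need.toNat - 1, by omega⟩
      rw [hk]
      simp [pvDfs, h0, PySem.List.combinations_nil_succ]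
  | cons p rest ih =>
    intro need hn g chosen st
    by_cases h0 : need = 0
    · subst h0
      simp [pvDfs, PySem.List.combinations_zero, pvStep, pvRecord]
    · obtain ⟨idx, ch⟩ := p
      have hk : need.toNat = (need - 1).toNat + 1 := by omega
      rw [pvDfs, if_neg h0, ih (need - 1) (by omega), ih need hn, hk,
          PySem.List.combinations_cons_succ, List.foldl_append, List.foldl_map]
      rw [← hk]
      congr 1
      apply PySem.List.foldl_congr_mem
      intro acc pick _
      exact (pv_step_cons g chosen idx ch acc pick).symm

theorem get_all_subsequences_of_length_n_from_string_spec : Claim_equal_get_all_subsequences_of_length_n_from_string := by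
  intro s n hdom hpre
  have hpre' : 0 ≤ n := hpre
  unfold Spec_get_all_subsequences_of_length_n_from_string
    get_all_subsequences_of_length_n_from_string get_all_subsequences_of_length_n_from_string_alt
  have hn : ¬ n < 0 := not_lt.mpr hpre'
  simp only [if_neg hn]
  set chars := s.toList with hchars
  have henum : PySem.List.enumerate chars 1 =
      (PySem.List.pyRange 0 chars.length 1).map (fun j => (j + 1, PySem.List.pyGetD chars j ' ')) := by
    have h := pv_enum_shift chars 0
    norm_num at h
    rw [h, PySem.List.enumerate_eq_map_pyRange chars ' ', List.map_map]
    rfl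
  rw [pv_dfs_eq _ n hpre', henum, PySem.List.combinations_map, List.foldl_map]
  have hfold : ∀ (st : PySem.Set String × PySem.Dict String (List (List Int)))
      (combi : List Int), combi ∈ PySem.List.combinations (PySem.List.pyRange 0 chars.length 1) n.toNat →
      (fun (st : PySem.Set String × PySem.Dict String (List (List Int))) combi =>
        let ngram := (PySem.List.pyRange 0 n 1).foldl
          (fun g i => g.push (PySem.List.pyGetD chars (PySem.List.pyGetD combi i 0) ' ')) ""
        let s := PySem.Set.add st.1 ngram
        let d := if st.2.contains ngram then st.2.modify ngram [] (fun l => l ++ [combi.map (· + 1)])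
                 else st.2.insert ngram [combi.map (· + 1)]
        (s, d)) st combi
      = pvStep "" [] st (combi.map (fun j => (j + 1, PySem.List.pyGetD chars j ' '))) := by
    intro st combi hmem
    have hlen : combi.length = n.toNat := PySem.List.length_of_mem_combinations hmem
    have hcast : ((combi.length : Int)) = n := by
      rw [hlen]; exact Int.toNat_of_nonneg hpre'
    simp only [pvStep, pvRecord, List.foldl_map, List.map_map, List.nil_append]
    rw [← hcast, PySem.List.foldl_pyRange_zero_pyGetD' combi 0
      (fun g j => g.push (PySem.List.pyGetD chars j ' ')) ""]
    rfl
  exact congrArg (fun r : PySem.Set String × PySem.Dict String (List (List Int)) => (r.1, r.2.items))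
    (PySem.List.foldl_congr_mem _ _ _ _ hfold)

@[simp] theorem get_all_subsequences_of_length_n_from_string_raises : Claim_raises_get_all_subsequences_of_length_n_from_string := by
  unfold Claim_raises_get_all_subsequences_of_length_n_from_string
  refine ⟨?_, by decide⟩
  intro s n _ hr hp
  exact absurd hp (by unfold Pre_get_all_subsequences_of_length_n_from_string Raises_get_all_subsequences_of_length_n_from_string at *; omega)
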